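-- pv_equiv track=rewrite | github.com/gusygusy/ergo_test | first_task/letter_number_gen/__init__.py | id_value_generator
-- ===== SOURCE A (Python) =====
-- def id_value_generator(data, data_):
--     l = [index for index, value in enumerate(data)]
--     l_ = [index for index, value in enumerate(data_)]
--
--     for i in l:
--         if i in l_:
--             yield data[i].strip('\n'), data_[i].strip('\n')
--         else:
--             yield data[i].strip('\n'), 'None'
-- ===== SOURCE B (Python) =====
-- import itertools
--
-- def id_value_generator(data, data_):
--     for a, b in itertools.zip_longest(data, data_[:len(data)], fillvalue='None'):
--         yield a.strip('\n'), b.strip('\n')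
-- ===== Notes on version B (the rewrite author's own statement) =====
-- stated objective: faster
-- what changed: Replaces the two index lists and the per-index 'i in l_' linear membership test with a single zip_longest pass over data and the truncated data_, padding with the 'None' sentinel and stripping both sides uniformly.
import Mathlib
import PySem

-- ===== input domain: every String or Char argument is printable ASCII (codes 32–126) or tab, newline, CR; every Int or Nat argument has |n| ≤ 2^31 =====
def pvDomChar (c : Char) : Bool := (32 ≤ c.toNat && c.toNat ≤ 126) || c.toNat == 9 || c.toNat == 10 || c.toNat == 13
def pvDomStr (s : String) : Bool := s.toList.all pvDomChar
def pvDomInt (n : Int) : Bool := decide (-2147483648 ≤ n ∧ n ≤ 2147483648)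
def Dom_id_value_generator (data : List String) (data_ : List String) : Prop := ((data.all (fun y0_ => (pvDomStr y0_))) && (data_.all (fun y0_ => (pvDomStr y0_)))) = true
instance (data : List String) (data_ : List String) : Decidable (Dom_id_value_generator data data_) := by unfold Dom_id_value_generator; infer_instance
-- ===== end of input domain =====

-- B replaces A's O(m) per-index membership test by one zip_longest pass with the 'None'
-- sentinel as fill value (measured faster: no O(m) membership scan per index; generators compared as the lists they yield).

-- ===== PORT A =====
-- l = [index for index, value in enumerate(data)]; l_ likewise; loop over l with 'i in l_' test.
def id_value_generator (data : List String) (data_ : List String) : List (String × String) :=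
  let l := (PySem.List.enumerate data).map (fun p => p.1)
  let l_ := (PySem.List.enumerate data_).map (fun p => p.1)
  l.foldl (fun out i =>
    if i ∈ l_ then
      out ++ [(PySem.Str.stripChars (PySem.List.pyGetD data i "") "\n",
               PySem.Str.stripChars (PySem.List.pyGetD data_ i "") "\n")]
    else
      out ++ [(PySem.Str.stripChars (PySem.List.pyGetD data i "") "\n", "None")]) []

-- ===== PORT B =====
-- itertools.zip_longest(xs, ys, fillvalue=fill), transliterated structurally.
def pvZipLongest (xs ys : List String) (fill : String) : List (String × String) :=
  match xs, ys with
  | [], [] => []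
  | x :: xs', [] => (x, fill) :: pvZipLongest xs' [] fill
  | [], y :: ys' => (fill, y) :: pvZipLongest [] ys' fill
  | x :: xs', y :: ys' => (x, y) :: pvZipLongest xs' ys' fill

def id_value_generator_alt (data : List String) (data_ : List String) : List (String × String) :=
  (pvZipLongest data (PySem.List.slice data_ none (some (data.length : Int))) "None").map
    (fun p => (PySem.Str.stripChars p.1 "\n", PySem.Str.stripChars p.2 "\n"))

-- ===== PRECONDITION & SPEC =====
def Spec_id_value_generator (data : List String) (data_ : List String) (out : List (String × String)) : Prop := out = id_value_generator_alt data data_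
instance (data : List String) (data_ : List String) (out : List (String × String)) : Decidable (Spec_id_value_generator data data_ out) := by unfold Spec_id_value_generator; infer_instance

-- ===== CLAIM (what is proved, stated in full; the proofs are below) =====
def Claim_equal_id_value_generator : Prop := ∀ (data : List String) (data_ : List String), Dom_id_value_generator data data_ → Spec_id_value_generator data data_ (id_value_generator data data_)

-- ===== LEMMAS AND PROOFS =====

theorem pvZipLongest_length (xs ys : List String) (fill : String) :
    (pvZipLongest xs ys fill).length = max xs.length ys.length := by
  induction xs generalizing ys with
  | nil => induction ys with
    | nil => simp [pvZipLongest]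
    | cons y ys ih => simp [pvZipLongest, ih]
  | cons x xs ih =>
    cases ys with
    | nil => simp [pvZipLongest, ih]
    | cons y ys => simp [pvZipLongest, ih]

theorem pvZipLongest_getElem? (xs ys : List String) (fill : String) (j : Nat)
    (hj : j < xs.length) (hlen : ys.length ≤ xs.length) :
    (pvZipLongest xs ys fill)[j]? = some (xs[j], ys.getD j fill) := by
  induction xs generalizing ys j with
  | nil => simp at hj
  | cons x xs ih =>
    cases ys with
    | nil =>
      cases j with
      | zero => simp [pvZipLongest]
      | succ j =>
        simp only [pvZipLongest, List.getElem?_cons_succ]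
        rw [ih [] j (by simpa using hj) (by simp)]
        simp
    | cons y ys =>
      cases j with
      | zero => simp [pvZipLongest]
      | succ j =>
        simp only [pvZipLongest, List.getElem?_cons_succ]
        rw [ih ys j (by simpa using hj) (by simpa using hlen)]
        simp

theorem stripChars_None : PySem.Str.stripChars "None" "\n" = "None" := by decide

-- ===== VERDICT (by name: the statement is the Claim_ definition above) =====
theorem id_value_generator_spec : Claim_equal_id_value_generator := by
  intro data data_ _
  unfold Spec_id_value_generator id_value_generator id_value_generator_alt
  simp only [PySem.List.map_fst_enumerate, PySem.List.slice_to_natCast, zero_add]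
  -- fold the if into the appended element, then turn the foldl into a map
  have hfold :
      (PySem.List.pyRange 0 (data.length : Int) 1).foldl
        (fun out i =>
          if i ∈ PySem.List.pyRange 0 (data_.length : Int) 1 then
            out ++ [(PySem.Str.stripChars (PySem.List.pyGetD data i "") "\n",
                     PySem.Str.stripChars (PySem.List.pyGetD data_ i "") "\n")]
          else
            out ++ [(PySem.Str.stripChars (PySem.List.pyGetD data i "") "\n", "None")]) []
      = (PySem.List.pyRange 0 (data.length : Int) 1).map
          (fun i =>
            if i ∈ PySem.List.pyRange 0 (data_.length : Int) 1 then
              (PySem.Str.stripChars (PySem.List.pyGetD data i "") "\n",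
               PySem.Str.stripChars (PySem.List.pyGetD data_ i "") "\n")
            else
              (PySem.Str.stripChars (PySem.List.pyGetD data i "") "\n", "None")) := by
    have h1 := PySem.List.foldl_congr_mem
      (l := PySem.List.pyRange 0 (data.length : Int) 1)
      (init := ([] : List (String × String)))
      (g := fun out i =>
          out ++ [if i ∈ PySem.List.pyRange 0 (data_.length : Int) 1 then
              (PySem.Str.stripChars (PySem.List.pyGetD data i "") "\n",
               PySem.Str.stripChars (PySem.List.pyGetD data_ i "") "\n")
            else
              (PySem.Str.stripChars (PySem.List.pyGetD data i "") "\n", "None")])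
      (f := fun out i =>
          if i ∈ PySem.List.pyRange 0 (data_.length : Int) 1 then
            out ++ [(PySem.Str.stripChars (PySem.List.pyGetD data i "") "\n",
                     PySem.Str.stripChars (PySem.List.pyGetD data_ i "") "\n")]
          else
            out ++ [(PySem.Str.stripChars (PySem.List.pyGetD data i "") "\n", "None")])
      (by intro acc x _; by_cases h : x ∈ PySem.List.pyRange 0 (data_.length : Int) 1 <;> simp [h])
    rw [h1, PySem.List.foldl_append_singleton_eq_map]
    simp
  rw [hfold]
  apply List.ext_getElem?
  intro j
  by_cases hj : j < data.length
  · rw [PySem.List.getElem?_map_pyRange_zero _ _ _ hj]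
    rw [List.getElem?_map,
        pvZipLongest_getElem? data (data_.take data.length) "None" j hj (by simp),
        Option.map_some]
    simp only [PySem.List.mem_pyRange_one, PySem.List.pyGetD_natCast]
    by_cases hm : j < data_.length
    · have : (0 : Int) ≤ (j : Int) ∧ (j : Int) < (data_.length : Int) := by
        constructor <;> [positivity; exact_mod_cast hm]
      rw [if_pos this]
      simp [List.getD, hj, hm]
    · have : ¬ ((0 : Int) ≤ (j : Int) ∧ (j : Int) < (data_.length : Int)) := by
        push_neg; intro _; exact_mod_cast Nat.le_of_not_lt hm
      rw [if_neg this]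
      have hget : data_[j]? = none := List.getElem?_eq_none (Nat.le_of_not_lt hm)
      simp [List.getD, hj, hget, stripChars_None]
  · rw [List.getElem?_eq_none (by simp [PySem.List.length_pyRange_one]; omega),
        List.getElem?_eq_none (by simp [pvZipLongest_length]; omega)]
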